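-- pv_equiv track=rewrite | github.com/VadimP21/Turbo | Module14/07_years/main.py | check_year
-- ===== SOURCE A (Python) =====
-- def check_year(year):
--     year_str = str(year)
--     count = 0
--     for digit in range(0, 10):
--         for number in year_str:
--             if digit == int(number):
--                 count += 1
--         if count == 3:
--             return int(year)
--         count = 0
-- ===== SOURCE B (Python) =====
-- def check_year(year):
--     counts = {}
--     for ch in str(year):
--         counts[ch] = counts.get(ch, 0) + 1
--     return year if 3 in counts.values() else None
-- ===== Notes on version B (the rewrite author's own statement) =====
-- stated objective: simpler
-- what changed: Replaces the 10-digit outer loop that rescans the string once per digit with a single pass building a character-frequency table, then one membership test on its values.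
-- crash fix: On negative years A raises ValueError (it calls int('-') on the sign character); B counts characters directly and returns the year when some character occurs exactly three times, e.g. check_year(-333) = -333. — e.g. on check_year(-333): A raises ValueError, B returns some (-333)
import Mathlib
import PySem

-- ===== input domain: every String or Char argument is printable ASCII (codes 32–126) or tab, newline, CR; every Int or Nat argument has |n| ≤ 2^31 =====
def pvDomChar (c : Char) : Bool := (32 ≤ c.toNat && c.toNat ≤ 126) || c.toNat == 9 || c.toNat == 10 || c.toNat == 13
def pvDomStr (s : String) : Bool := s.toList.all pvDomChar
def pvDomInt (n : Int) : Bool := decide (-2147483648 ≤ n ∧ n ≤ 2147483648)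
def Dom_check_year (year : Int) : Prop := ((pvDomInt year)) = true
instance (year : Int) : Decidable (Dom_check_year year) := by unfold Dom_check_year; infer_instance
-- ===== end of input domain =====

-- B replaces A's ten rescans of str(year) (one per candidate digit) by one pass building a
-- character-frequency table and a single membership test on its values: simpler, one pass.

-- ===== PORT A =====
-- int(number) for a one-character string; exact under Pre_ (all characters are decimal digits,
-- so ofChars? never returns none there; outside Pre_ Python raises ValueError).
def pyIntOfChar (ch : Char) : Int := (PySem.Int.ofChars? [ch]).getD 0

-- the 'for digit in range(0, 10)' loop with its early return; count is reset per digit,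
-- so each iteration recomputes it from 0 over the whole string, as A does.
def checkYearGo (year : Int) (s : List Char) : List Int → Option Int
  | [] => none
  | d :: ds =>
    let count : Int := s.foldl (fun c ch => if d == pyIntOfChar ch then c + 1 else c) 0
    if count == 3 then some year else checkYearGo year s ds

def check_year (year : Int) : Option Int :=
  checkYearGo year (PySem.Int.toChars year) (PySem.List.pyRange 0 10 1)

-- ===== PORT B =====
def check_year_alt (year : Int) : Option Int :=
  let counts := (PySem.Int.toChars year).foldl
    (fun (d : PySem.Dict Char Int) ch => d.insert ch (d.getD ch 0 + 1)) PySem.Dict.empty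
  if counts.values.contains (3 : Int) then some year else none

-- ===== PRECONDITION & SPEC =====
-- A calls int() on every character of str(year); for year < 0 the first character is '-',
-- so A raises ValueError there: Pre_ admits exactly the non-negative years.
def Pre_check_year (year : Int) : Prop := 0 ≤ year
instance (year : Int) : Decidable (Pre_check_year year) := by unfold Pre_check_year; infer_instance

def pvWitness_check_year : Int := 1999

-- On negative years A raises ValueError (int('-') on the sign character); B counts characters
-- directly and returns the year when some character occurs exactly three times.
def Raises_check_year (year : Int) : Prop := year < 0
instance (year : Int) : Decidable (Raises_check_year year) := by unfold Raises_check_year; infer_instance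
def pvRaiseWitness_check_year : Int := -333
def pvRaiseWitnessOut_check_year : Option Int := some (-333)

def Spec_check_year (year : Int) (out : Option Int) : Prop := out = check_year_alt year
instance (year : Int) (out : Option Int) : Decidable (Spec_check_year year out) := by unfold Spec_check_year; infer_instance

-- ===== CLAIM (what is proved, stated in full; the proofs are below) =====
def Claim_equal_check_year : Prop :=
  ∀ (year : Int), Dom_check_year year → Pre_check_year year → Spec_check_year year (check_year year)

def Claim_raises_check_year : Prop :=
  (∀ (year : Int), Dom_check_year year → Raises_check_year year → ¬ Pre_check_year year) ∧
  (Dom_check_year (pvRaiseWitness_check_year) ∧ Raises_check_year (pvRaiseWitness_check_year) ∧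
   check_year_alt (pvRaiseWitness_check_year) = pvRaiseWitnessOut_check_year)

-- ===== LEMMAS AND PROOFS =====

def digitChars : List Char := ['0','1','2','3','4','5','6','7','8','9']

lemma digitChar_mem_digitChars (n : Nat) (h : n < 10) : n.digitChar ∈ digitChars := by
  interval_cases n <;> decide

lemma toDigitsCore_mem (fuel n : Nat) (acc : List Char)
    (hacc : ∀ c ∈ acc, c ∈ digitChars) :
    ∀ c ∈ Nat.toDigitsCore 10 fuel n acc, c ∈ digitChars := by
  induction fuel generalizing n acc with
  | zero => simpa [Nat.toDigitsCore] using hacc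
  | succ fuel ih =>
    intro c hc
    simp only [Nat.toDigitsCore] at hc
    split at hc
    · rw [List.mem_cons] at hc
      rcases hc with h | h
      · exact h ▸ digitChar_mem_digitChars _ (Nat.mod_lt _ (by norm_num))
      · exact hacc _ h
    · refine ih _ _ ?_ _ hc
      intro c' hc'
      rw [List.mem_cons] at hc'
      rcases hc' with h | h
      · exact h ▸ digitChar_mem_digitChars _ (Nat.mod_lt _ (by norm_num))
      · exact hacc _ h

lemma toChars_mem_digitChars (year : Int) (hy : 0 ≤ year) :
    ∀ c ∈ PySem.Int.toChars year, c ∈ digitChars := by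
  have : ¬ year < 0 := not_lt.mpr hy
  simp only [PySem.Int.toChars, this, if_false, Nat.toDigits]
  exact toDigitsCore_mem _ _ [] (by simp)

set_option maxRecDepth 100000 in
lemma pyIntOfChar_vals : digitChars.map pyIntOfChar = [0,1,2,3,4,5,6,7,8,9] := by decide

lemma pyIntOfChar_inj : ∀ a ∈ digitChars, ∀ b ∈ digitChars,
    pyIntOfChar a = pyIntOfChar b → a = b := by
  have h := pyIntOfChar_vals
  simp only [digitChars, List.map_cons, List.map_nil, List.cons.injEq] at h
  intro a ha b hb hab
  fin_cases ha <;> fin_cases hb <;> simp_all <;> omega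

lemma pyIntOfChar_mem_range : ∀ a ∈ digitChars,
    pyIntOfChar a ∈ PySem.List.pyRange 0 10 1 := by
  have h := pyIntOfChar_vals
  simp only [digitChars, List.map_cons, List.map_nil, List.cons.injEq] at h
  intro a ha
  fin_cases ha <;> simp_all

-- the value of A's inner loop over a digit-only string, as a per-character count
lemma countP_eq_count (s : List Char) (hs : ∀ c ∈ s, c ∈ digitChars)
    (c : Char) (hc : c ∈ digitChars) :
    s.countP (fun ch => pyIntOfChar c == pyIntOfChar ch) = s.count c := by
  unfold List.count
  apply List.countP_congr
  intro ch hch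
  have hchd := hs ch hch
  simp only [beq_iff_eq]
  constructor
  · intro h; exact ((pyIntOfChar_inj ch hchd c hc) h.symm)
  · intro h; exact h ▸ rfl

lemma checkYearGo_eq (year : Int) (s : List Char) (L : List Int) :
    checkYearGo year s L =
      if L.any (fun d => s.countP (fun ch => d == pyIntOfChar ch) == 3) then some year
      else none := by
  induction L with
  | nil => simp [checkYearGo]
  | cons d ds ih =>
    simp only [checkYearGo, PySem.List.foldl_count_if, zero_add, List.any_cons, ih]
    by_cases h : s.countP (fun ch => d == pyIntOfChar ch) = 3
    · simp [h]
    · have h' : ((s.countP (fun ch => d == pyIntOfChar ch) : Int) == 3) = false := by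
        simp only [beq_eq_false_iff_ne, ne_eq]
        exact_mod_cast h
      simp [h, h']

-- B's membership test, reduced to 'some character occurs exactly three times'
lemma alt_values_iff (year : Int) :
    ((PySem.Int.toChars year).foldl
      (fun (d : PySem.Dict Char Int) ch => d.insert ch (d.getD ch 0 + 1))
      PySem.Dict.empty).values.contains (3 : Int) = true ↔
    ∃ c ∈ PySem.Int.toChars year, (PySem.Int.toChars year).count c = 3 := by
  rw [PySem.Dict.foldl_insert_getD_add_one_eq_counter]
  simp only [PySem.Dict.values, PySem.Dict.items_counter, List.contains_eq_mem,
    List.map_map, decide_eq_true_eq, List.mem_map, Function.comp]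
  constructor
  · rintro ⟨c, hc, hv⟩
    exact ⟨c, (PySem.Set.mem_ofList _ _).mp hc, by exact_mod_cast hv⟩
  · rintro ⟨c, hc, hv⟩
    exact ⟨c, (PySem.Set.mem_ofList _ _).mpr hc, by exact_mod_cast hv⟩

-- ===== VERDICT (by name: the statement is the Claim_ definition above) =====
theorem check_year_spec : Claim_equal_check_year := by
  intro year _ hpre
  unfold Spec_check_year check_year check_year_alt
  set s := PySem.Int.toChars year with hsdef
  have hs : ∀ c ∈ s, c ∈ digitChars := toChars_mem_digitChars year hpre
  rw [checkYearGo_eq]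
  have hany : ((PySem.List.pyRange 0 10 1).any
      (fun d => s.countP (fun ch => d == pyIntOfChar ch) == 3)) = true ↔
      ∃ c ∈ s, s.count c = 3 := by
    rw [List.any_eq_true]
    constructor
    · rintro ⟨d, hd, hcp⟩
      rw [beq_iff_eq] at hcp
      have h3 : s.countP (fun ch => d == pyIntOfChar ch) = 3 := by exact_mod_cast hcp
      have hpos : 0 < s.countP (fun ch => d == pyIntOfChar ch) := by omega
      obtain ⟨c, hc, hpc⟩ := List.countP_pos_iff.mp hpos
      have hcd := hs c hc
      have hdc : d = pyIntOfChar c := by simpa using hpc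
      refine ⟨c, hc, ?_⟩
      rw [← countP_eq_count s hs c hcd, ← hdc, h3]
    · rintro ⟨c, hc, hcount⟩
      have hcd := hs c hc
      refine ⟨pyIntOfChar c, pyIntOfChar_mem_range c hcd, ?_⟩
      rw [beq_iff_eq, countP_eq_count s hs c hcd, hcount]
  have key : ((PySem.List.pyRange 0 10 1).any
      (fun d => s.countP (fun ch => d == pyIntOfChar ch) == 3)) =
      ((s.foldl (fun (d : PySem.Dict Char Int) ch => d.insert ch (d.getD ch 0 + 1))
        PySem.Dict.empty).values.contains (3 : Int)) := by
    rw [Bool.eq_iff_iff, hany, alt_values_iff year]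
  rw [key]

@[simp] theorem check_year_raises : Claim_raises_check_year := by
  unfold Claim_raises_check_year
  exact ⟨fun year _ hr hp => absurd hp (by unfold Pre_check_year Raises_check_year at *; omega),
    by decide⟩
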